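-- pv_equiv track=rewrite | github.com/mostgood1/WNBA-Betting | tools/audit_smart_sim_player_coverage.py | _norm_player_key
-- ===== SOURCE A (Python) =====
-- def _norm_player_key(name) -> str:
--     text = str(name or "").strip().upper()
--     if not text:
--         return ""
--     for token in (".", ",", "'", "-"):
--         text = text.replace(token, " ")
--     parts = [part for part in text.split() if part]
--     drop = {"JR", "SR", "II", "III", "IV", "V"}
--     parts = [part for part in parts if part not in drop]
--     return " ".join(parts)
-- ===== SOURCE B (Python) =====
-- def _norm_player_key(name) -> str:
--     # Single fused scan over the uppercased text instead of A's replace/split/filter pipeline.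
--     text = str(name or "").upper()
--     drop = {"JR", "SR", "II", "III", "IV", "V"}
--     out = []
--     buf = []
--     for ch in text:
--         if ch in ".,'-" or ch.isspace():
--             if buf:
--                 tok = "".join(buf)
--                 if tok not in drop:
--                     out.append(tok)
--                 buf = []
--         else:
--             buf.append(ch)
--     if buf:
--         tok = "".join(buf)
--         if tok not in drop:
--             out.append(tok)
--     return " ".join(out)
-- ===== Notes on version B (the rewrite author's own statement) =====
-- stated objective: alternative
-- what changed: Replaced A's multi-pass pipeline (strip, four whole-string replace passes, split, two filter passes, join) by a single fused character scan that maintains a token buffer, classifies delimiters (punctuation or whitespace) on the fly, and drops suffix tokens at flush time.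
import Mathlib
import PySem

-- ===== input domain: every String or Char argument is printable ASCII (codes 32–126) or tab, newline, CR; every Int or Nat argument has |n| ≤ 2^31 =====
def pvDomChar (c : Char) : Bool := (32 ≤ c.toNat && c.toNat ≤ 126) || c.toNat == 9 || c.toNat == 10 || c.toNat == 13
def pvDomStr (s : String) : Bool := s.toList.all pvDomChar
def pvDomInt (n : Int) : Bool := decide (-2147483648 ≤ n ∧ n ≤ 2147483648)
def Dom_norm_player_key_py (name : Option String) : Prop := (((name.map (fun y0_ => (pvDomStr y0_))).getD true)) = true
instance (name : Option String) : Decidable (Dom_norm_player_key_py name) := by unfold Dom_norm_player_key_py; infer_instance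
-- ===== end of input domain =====

-- B replaces A's strip/replace/split/filter pipeline by one fused scan with a token buffer
-- (alternative decomposition, same asymptotic cost).

-- ===== PORT A =====
def pvDropSetA : PySem.Set String := PySem.Set.ofList ["JR", "SR", "II", "III", "IV", "V"]

def norm_player_key_py (name : Option String) : String :=
  let text := PySem.Str.upper (PySem.Str.strip (name.getD ""))
  if text = "" then ""
  else
    let text2 := [".", ",", "'", "-"].foldl (fun t tok => PySem.Str.replace t tok " ") text
    let parts := (PySem.Str.split₀ text2).filter (fun part => !(part == ""))
    let parts2 := parts.filter (fun part => !(PySem.Set.contains pvDropSetA part))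
    PySem.Str.join " " parts2

-- ===== PORT B =====
def pvDelimB (c : Char) : Bool := c == '.' || c == ',' || c == '\'' || c == '-' || PySem.Chars.isspace c

def pvDropB : List (List Char) := [['J','R'], ['S','R'], ['I','I'], ['I','I','I'], ['I','V'], ['V']]

def pvFlushB (buf : List Char) (out : List (List Char)) : List (List Char) :=
  if buf.isEmpty then out
  else if decide (buf.reverse ∈ pvDropB) then out
  else out ++ [buf.reverse]

def pvScanB : List Char → List Char → List (List Char) → List (List Char)
  | [], buf, out => pvFlushB buf out
  | c :: rest, buf, out =>
    if pvDelimB c then pvScanB rest [] (pvFlushB buf out)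
    else pvScanB rest (c :: buf) out

def norm_player_key_py_alt (name : Option String) : String :=
  String.ofList (PySem.Chars.join [' '] (pvScanB (PySem.Str.upper (name.getD "")).toList [] []))

-- ===== PRECONDITION & SPEC =====
def Spec_norm_player_key_py (name : Option String) (out : String) : Prop := out = norm_player_key_py_alt name
instance (name : Option String) (out : String) : Decidable (Spec_norm_player_key_py name out) := by unfold Spec_norm_player_key_py; infer_instance

-- ===== CLAIM (what is proved, stated in full; the proofs are below) =====
def Claim_equal_norm_player_key_py : Prop := ∀ (name : Option String), Dom_norm_player_key_py name → Spec_norm_player_key_py name (norm_player_key_py name)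

-- ===== LEMMAS AND PROOFS =====

/-- Canonical tokenizer: split at characters satisfying `p`; `buf` is the current token reversed. -/
def pvTok (p : Char → Bool) : List Char → List Char → List (List Char)
  | [], buf => if buf.isEmpty then [] else [buf.reverse]
  | c :: r, buf =>
    if p c then (if buf.isEmpty then pvTok p r [] else buf.reverse :: pvTok p r [])
    else pvTok p r (c :: buf)

/-- The single-character substitution A's four `replace` passes compose to. -/
def pvF (c : Char) : Char := if c == '.' || c == ',' || c == '\'' || c == '-' then ' ' else c

theorem pvTok_split₀go : ∀ (cs cur : List Char) (acc : List (List Char)),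
    PySem.Chars.split₀.go cs cur acc = acc.reverse ++ pvTok PySem.Chars.isspace cs cur := by
  intro cs
  induction cs with
  | nil =>
    intro cur acc
    simp only [PySem.Chars.split₀.go, pvTok]
    split <;> simp
  | cons c r ih =>
    intro cur acc
    simp only [PySem.Chars.split₀.go, pvTok]
    by_cases h : PySem.Chars.isspace c = true
    · simp only [h, if_pos]
      by_cases hc : cur.isEmpty
      · simp [hc, ih]
      · simp [hc, ih]
    · simp only [eq_false_of_ne_true h]
      simp [ih]

theorem pvReplace_single (d : Char) : ∀ (l acc : List Char),
    PySem.Chars.replace.go [d] [' '] l.length l acc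
      = acc.reverse ++ l.map (fun c => if c == d then ' ' else c) := by
  intro l
  induction l with
  | nil => intro acc; simp [PySem.Chars.replace.go]
  | cons c t ih =>
    intro acc
    simp only [List.length_cons, PySem.Chars.replace.go, List.map_cons]
    by_cases h : c = d
    · subst h
      simp [List.isPrefixOf, ih]
    · have hp : [d].isPrefixOf (c :: t) = false := by
        simp [List.isPrefixOf]
        exact fun hh => absurd hh.symm h
      simp [hp, ih, h]

theorem pvReplace_single_top (d : Char) (l : List Char) :
    PySem.Chars.replace l [d] [' '] = l.map (fun c => if c == d then ' ' else c) := by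
  simp [PySem.Chars.replace, pvReplace_single]

theorem pvF_comp (c : Char) :
    (if (if (if (if c == '.' then ' ' else c) == ',' then ' '
          else (if c == '.' then ' ' else c)) == '\'' then ' '
          else (if (if c == '.' then ' ' else c) == ',' then ' '
          else (if c == '.' then ' ' else c))) == '-' then ' '
     else (if (if (if c == '.' then ' ' else c) == ',' then ' '
          else (if c == '.' then ' ' else c)) == '\'' then ' '
          else (if (if c == '.' then ' ' else c) == ',' then ' '
          else (if c == '.' then ' ' else c)))) = pvF c := by
  simp only [pvF]
  by_cases h1 : c = '.' <;> by_cases h2 : c = ',' <;> by_cases h3 : c = '\'' <;> by_cases h4 : c = '-' <;>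
    simp_all

theorem pvIsspace_pvF (c : Char) : PySem.Chars.isspace (pvF c) = pvDelimB c := by
  simp only [pvF, pvDelimB]
  by_cases h1 : c = '.' <;> by_cases h2 : c = ',' <;> by_cases h3 : c = '\'' <;> by_cases h4 : c = '-' <;>
    simp_all <;> decide

theorem pvUpper_space (c : Char) (h : PySem.Chars.isspace c = true) :
    PySem.Chars.upperChar c = c := by
  have hl : PySem.Chars.islower c = false := by
    simp only [PySem.Chars.isspace, decide_eq_true_eq, Bool.or_eq_true, Bool.and_eq_true] at h
    simp only [PySem.Chars.islower, Bool.and_eq_false_iff, decide_eq_false_iff_not, Char.le_def,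
      UInt32.le_iff_toNat_le, not_le]
    have h1 : Char.toNat c = c.val.toNat := rfl
    have h2 : ('a').val.toNat = 97 := rfl
    have h3 : ('z').val.toNat = 122 := rfl
    omega
  simp [PySem.Chars.upperChar, hl]

theorem pvTok_map (p : Char → Bool) (u : Char → Char) :
    ∀ (cs buf : List Char),
      pvTok p (cs.map u) (buf.map u)
        = (pvTok (fun c => p (u c)) cs buf).map (List.map u) := by
  intro cs
  induction cs with
  | nil => intro buf; simp only [List.map_nil, pvTok]; split <;> simp_all
  | cons c r ih =>
    intro buf
    simp only [List.map_cons, pvTok]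
    by_cases h : p (u c) = true
    · have := ih ([] : List Char)
      simp only [List.map_nil] at this
      by_cases hb : buf.isEmpty <;> simp_all
    · have := ih (c :: buf)
      simp_all

theorem pvTok_all_delim (p : Char → Bool) :
    ∀ (ws buf : List Char), (∀ c ∈ ws, p c = true) → pvTok p ws buf = pvTok p [] buf := by
  intro ws
  induction ws with
  | nil => intro buf _; rfl
  | cons c r ih =>
    intro buf h
    have hc := h c (by simp)
    have hr : ∀ c ∈ r, p c = true := fun x hx => h x (List.mem_cons_of_mem _ hx)
    have h0 := ih ([] : List Char) hr
    simp only [pvTok, hc, if_pos]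
    by_cases hb : buf.isEmpty <;> simp_all [pvTok]

theorem pvTok_append_delim (p : Char → Bool) (ws : List Char) (hws : ∀ c ∈ ws, p c = true) :
    ∀ (cs buf : List Char), pvTok p (cs ++ ws) buf = pvTok p cs buf := by
  intro cs
  induction cs with
  | nil => intro buf; simpa using pvTok_all_delim p ws buf hws
  | cons c r ih =>
    intro buf
    simp only [List.cons_append, pvTok]
    by_cases h : p c = true <;> simp_all

theorem pvTok_lstrip (p : Char → Bool) (hsp : ∀ c, PySem.Chars.isspace c = true → p c = true) :
    ∀ (cs : List Char), pvTok p (List.dropWhile PySem.Chars.isspace cs) [] = pvTok p cs [] := by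
  intro cs
  induction cs with
  | nil => rfl
  | cons c r ih =>
    by_cases h : PySem.Chars.isspace c = true
    · rw [List.dropWhile_cons_of_pos h, ih]
      simp [pvTok, hsp c h]
    · rw [List.dropWhile_cons_of_neg (by simp_all)]

theorem pvTok_strip (p : Char → Bool) (hsp : ∀ c, PySem.Chars.isspace c = true → p c = true)
    (cs : List Char) : pvTok p (PySem.Chars.strip cs) [] = pvTok p cs [] := by
  rw [PySem.Chars.strip]
  set l := PySem.Chars.lstrip cs with hl
  have hdecomp : PySem.Chars.rstrip l ++ (List.takeWhile PySem.Chars.isspace l.reverse).reverse = l := by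
    rw [PySem.Chars.rstrip]
    have := List.takeWhile_append_dropWhile (p := PySem.Chars.isspace) (l := l.reverse)
    calc (List.dropWhile PySem.Chars.isspace l.reverse).reverse
          ++ (List.takeWhile PySem.Chars.isspace l.reverse).reverse
        = (List.takeWhile PySem.Chars.isspace l.reverse ++ List.dropWhile PySem.Chars.isspace l.reverse).reverse := by
          rw [List.reverse_append]
      _ = l := by rw [this, List.reverse_reverse]
  have hws : ∀ c ∈ (List.takeWhile PySem.Chars.isspace l.reverse).reverse, p c = true := by
    intro c hc
    exact hsp c (List.mem_takeWhile_imp (List.mem_reverse.mp hc))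
  calc pvTok p (PySem.Chars.rstrip l) []
      = pvTok p (PySem.Chars.rstrip l ++ (List.takeWhile PySem.Chars.isspace l.reverse).reverse) [] := by
        rw [pvTok_append_delim p _ hws]
    _ = pvTok p l [] := by rw [hdecomp]
    _ = pvTok p cs [] := by rw [hl, PySem.Chars.lstrip, pvTok_lstrip p hsp]

theorem pvTok_ne_nil (p : Char → Bool) :
    ∀ (cs buf : List Char), ∀ t ∈ pvTok p cs buf, t ≠ [] := by
  intro cs
  induction cs with
  | nil =>
    intro buf t ht
    simp only [pvTok] at ht
    by_cases hb : buf.isEmpty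
    · simp [hb] at ht
    · simp only [hb, if_neg, Bool.false_eq_true, not_false_iff, List.mem_singleton] at ht
      subst ht
      simpa [List.isEmpty_iff] using hb
  | cons c r ih =>
    intro buf t ht
    simp only [pvTok] at ht
    by_cases h : p c = true
    · rw [if_pos h] at ht
      by_cases hb : buf.isEmpty
      · rw [if_pos hb] at ht
        exact ih [] t ht
      · rw [if_neg hb] at ht
        rcases List.mem_cons.mp ht with rfl | ht
        · simpa [List.isEmpty_iff] using hb
        · exact ih [] t ht
    · rw [if_neg (by simp_all)] at ht
      exact ih (c :: buf) t ht

theorem pvTok_chars (p : Char → Bool) :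
    ∀ (cs buf : List Char), (∀ c ∈ buf, p c = false) →
      ∀ t ∈ pvTok p cs buf, ∀ c ∈ t, p c = false := by
  intro cs
  induction cs with
  | nil =>
    intro buf hbuf t ht c hc
    simp only [pvTok] at ht
    by_cases hb : buf.isEmpty
    · simp [hb] at ht
    · rw [if_neg hb] at ht
      rcases List.mem_singleton.mp ht with rfl
      exact hbuf c (List.mem_reverse.mp hc)
  | cons ch r ih =>
    intro buf hbuf t ht c hc
    simp only [pvTok] at ht
    by_cases h : p ch = true
    · rw [if_pos h] at ht
      by_cases hb : buf.isEmpty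
      · rw [if_pos hb] at ht
        exact ih [] (by simp) t ht c hc
      · rw [if_neg hb] at ht
        rcases List.mem_cons.mp ht with rfl | ht
        · exact hbuf c (List.mem_reverse.mp hc)
        · exact ih [] (by simp) t ht c hc
    · rw [if_neg (by simp_all)] at ht
      refine ih (ch :: buf) ?_ t ht c hc
      intro x hx
      rcases List.mem_cons.mp hx with rfl | hx
      · simpa using h
      · exact hbuf x hx

theorem pvScanB_eq : ∀ (cs buf : List Char) (out : List (List Char)),
    pvScanB cs buf out = out ++ (pvTok pvDelimB cs buf).filter (fun t => !decide (t ∈ pvDropB)) := by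
  intro cs
  induction cs with
  | nil =>
    intro buf out
    simp only [pvScanB, pvTok, pvFlushB]
    by_cases hb : buf.isEmpty
    · simp [hb]
    · rw [if_neg hb, if_neg hb]
      by_cases hd : buf.reverse ∈ pvDropB <;> simp [hd]
  | cons c r ih =>
    intro buf out
    simp only [pvScanB, pvTok]
    by_cases h : pvDelimB c = true
    · rw [if_pos h, if_pos h, ih]
      by_cases hb : buf.isEmpty
      · simp [hb, pvFlushB]
      · rw [if_neg hb]
        by_cases hd : buf.reverse ∈ pvDropB
        · simp [pvFlushB, hb, hd, List.filter_cons]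
        · simp [pvFlushB, hb, hd, List.filter_cons]
    · rw [if_neg (by simp_all), if_neg (by simp_all), ih]

theorem pvDrop_contains (part : String) :
    PySem.Set.contains pvDropSetA part = decide (part.toList ∈ pvDropB) := by
  have hset : pvDropSetA = ["JR", "SR", "II", "III", "IV", "V"] := by decide
  have hmem : part ∈ (["JR", "SR", "II", "III", "IV", "V"] : List String)
      ↔ part.toList ∈ pvDropB := by
    have e1 : "JR".toList = ['J','R'] := by decide
    have e2 : "SR".toList = ['S','R'] := by decide
    have e3 : "II".toList = ['I','I'] := by decide
    have e4 : "III".toList = ['I','I','I'] := by decide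
    have e5 : "IV".toList = ['I','V'] := by decide
    have e6 : "V".toList = ['V'] := by decide
    simp only [pvDropB, List.mem_cons, List.mem_singleton, ← String.toList_inj, e1, e2, e3, e4,
      e5, e6, List.not_mem_nil, or_false]
  by_cases h : part.toList ∈ pvDropB
  · rw [decide_eq_true h]
    exact (PySem.Set.contains_iff _ _).mpr (hset ▸ hmem.mpr h)
  · rw [decide_eq_false h]
    by_contra hc
    exact h (hmem.mp (hset ▸ (PySem.Set.contains_iff _ _).mp (by simp_all)))

theorem pvF_id (d : Char) (h : pvDelimB d = false) : pvF d = d := by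
  simp only [pvDelimB, Bool.or_eq_false_iff] at h
  simp [pvF, h.1.1.1.1, h.1.1.1.2, h.1.1.2, h.1.2]

theorem pvFilter_map_toList (L : List String) (p : String → Bool) (q : List Char → Bool)
    (h : ∀ s, p s = q s.toList) :
    (L.filter p).map String.toList = (L.map String.toList).filter q := by
  rw [List.filter_map]
  exact congrArg (List.map String.toList) (List.filter_congr (fun x _ => by simpa [Function.comp] using h x))

theorem pvP_sp : ∀ c, PySem.Chars.isspace c = true →
    (fun c => pvDelimB (PySem.Chars.upperChar c)) c = true := by
  intro c h
  simp only [pvUpper_space c h, pvDelimB, h, Bool.or_true]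

theorem main_eq (name : Option String) : norm_player_key_py name = norm_player_key_py_alt name := by
  set s0 : String := name.getD "" with hs0
  set P : Char → Bool := fun c => pvDelimB (PySem.Chars.upperChar c) with hP
  set base : List (List Char) := pvTok P s0.toList [] with hbase
  -- B side
  have hBtok : pvScanB (PySem.Str.upper s0).toList [] []
      = (base.map (List.map PySem.Chars.upperChar)).filter (fun t => !decide (t ∈ pvDropB)) := by
    rw [pvScanB_eq]
    rw [PySem.Str.toList_upper, PySem.Chars.upper]
    have := pvTok_map pvDelimB PySem.Chars.upperChar s0.toList []
    simp only [List.map_nil] at this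
    rw [this, ← hP, ← hbase, List.nil_append]
  have hB : norm_player_key_py_alt name = String.ofList (PySem.Chars.join [' ']
      ((base.map (List.map PySem.Chars.upperChar)).filter (fun t => !decide (t ∈ pvDropB)))) := by
    rw [norm_player_key_py_alt, ← hs0, hBtok]
  by_cases htext : PySem.Str.upper (PySem.Str.strip s0) = ""
  · -- stripped text empty: both sides are ""
    have hstrip : PySem.Chars.strip s0.toList = [] := by
      have := congrArg String.toList htext
      rw [PySem.Str.toList_upper, PySem.Chars.upper, PySem.Str.toList_strip] at this
      simpa using this
    have hbase0 : base = [] := by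
      rw [hbase, ← pvTok_strip P pvP_sp, hstrip]
      rfl
    rw [hB, hbase0]
    rw [norm_player_key_py, ← hs0]
    rw [if_pos htext]
    simp only [List.map_nil, List.filter_nil]
    rfl
  · -- main branch
    rw [norm_player_key_py, ← hs0, if_neg htext]
    rw [hB]
    apply String.toList_inj.mp
    rw [PySem.Str.toList_join]
    have hsep : (" " : String).toList = [' '] := by decide
    rw [hsep]
    have htl : (String.ofList (PySem.Chars.join [' ']
        ((base.map (List.map PySem.Chars.upperChar)).filter (fun t => !decide (t ∈ pvDropB))))).toList
        = PySem.Chars.join [' ']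
        ((base.map (List.map PySem.Chars.upperChar)).filter (fun t => !decide (t ∈ pvDropB))) := by
      simp
    rw [htl]
    refine congrArg (PySem.Chars.join [' ']) ?_
    -- remains: parts2.map toList = filtered mapped base
    -- text2 computation
    have e1 : ("." : String).toList = ['.'] := by decide
    have e2 : ("," : String).toList = [','] := by decide
    have e3 : ("'" : String).toList = ['\''] := by decide
    have e4 : ("-" : String).toList = ['-'] := by decide
    have esp : (" " : String).toList = [' '] := by decide
    set text := PySem.Str.upper (PySem.Str.strip s0) with htextdef
    have htext2 : ([".", ",", "'", "-"].foldl (fun t tok => PySem.Str.replace t tok " ") text).toList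
        = (PySem.Chars.strip s0.toList).map (fun c => pvF (PySem.Chars.upperChar c)) := by
      simp only [List.foldl_cons, List.foldl_nil]
      rw [PySem.Str.toList_replace, PySem.Str.toList_replace, PySem.Str.toList_replace,
        PySem.Str.toList_replace, e1, e2, e3, e4, esp]
      rw [pvReplace_single_top, pvReplace_single_top, pvReplace_single_top, pvReplace_single_top]
      rw [htextdef, PySem.Str.toList_upper, PySem.Chars.upper, PySem.Str.toList_strip]
      simp only [List.map_map]
      apply List.map_congr_left
      intro c _
      simp only [Function.comp]
      exact pvF_comp (PySem.Chars.upperChar c)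
    -- split
    have hsplit : (PySem.Str.split₀ ([".", ",", "'", "-"].foldl (fun t tok => PySem.Str.replace t tok " ") text)).map String.toList
        = base.map (List.map (fun c => pvF (PySem.Chars.upperChar c))) := by
      rw [PySem.Str.split₀_map_toList, htext2]
      have : PySem.Chars.split₀ ((PySem.Chars.strip s0.toList).map (fun c => pvF (PySem.Chars.upperChar c)))
          = pvTok PySem.Chars.isspace ((PySem.Chars.strip s0.toList).map (fun c => pvF (PySem.Chars.upperChar c))) [] := by
        rw [PySem.Chars.split₀, pvTok_split₀go]; rfl
      rw [this]
      have hm := pvTok_map PySem.Chars.isspace (fun c => pvF (PySem.Chars.upperChar c)) (PySem.Chars.strip s0.toList) []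
      simp only [List.map_nil] at hm
      rw [hm]
      have hpred : (fun c => PySem.Chars.isspace (pvF (PySem.Chars.upperChar c))) = P := by
        funext c; rw [hP]; exact pvIsspace_pvF (PySem.Chars.upperChar c)
      rw [hpred, pvTok_strip P pvP_sp, ← hbase]
    -- now the two filters
    rw [pvFilter_map_toList _ _ (fun t => !decide (t ∈ pvDropB)) (fun s => by rw [pvDrop_contains])]
    rw [pvFilter_map_toList _ _ (fun t => !(t == [])) (fun s => by
      rcases hh : s == "" with h | h
      · simp only [beq_eq_false_iff_ne] at hh
        have : s.toList ≠ [] := fun hc => hh (String.toList_inj.mp (by simpa using hc))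
        simp [this]
      · have : s = "" := by simpa using hh
        subst this
        simp)]
    rw [hsplit]
    -- the nonempty filter is the identity on base tokens
    have hne : (base.map (List.map (fun c => pvF (PySem.Chars.upperChar c)))).filter (fun t => !(t == []))
        = base.map (List.map (fun c => pvF (PySem.Chars.upperChar c))) := by
      apply List.filter_eq_self.mpr
      intro t ht
      rcases List.mem_map.mp ht with ⟨t', ht', rfl⟩
      have := pvTok_ne_nil P s0.toList [] t' ht'
      simp [List.map_eq_nil_iff, this]
    rw [hne]
    -- map pvF∘upper = map upper on tokens
    have hmapeq : base.map (List.map (fun c => pvF (PySem.Chars.upperChar c)))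
        = base.map (List.map PySem.Chars.upperChar) := by
      apply List.map_congr_left
      intro t ht
      apply List.map_congr_left
      intro c hc
      have hchar := pvTok_chars P s0.toList [] (by simp) t ht c hc
      exact pvF_id _ (by rw [hP] at hchar; exact hchar)
    rw [hmapeq]

-- ===== VERDICT (by name: the statement is the Claim_ definition above) =====
theorem norm_player_key_py_spec : Claim_equal_norm_player_key_py := by
  intro name _
  unfold Spec_norm_player_key_py
  exact main_eq name
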